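-- pv_equiv track=rewrite | github.com/Sonia-96/Coursera-Data_Structures_and_Algorithms | 2-Data Structures/Week4-Hash Tables and Hash Functions/5-longest common substring.py | HashDict
-- ===== SOURCE A (Python) =====
-- def PolyHash(s, prime, multiplier):
--     hash_value = 0
--     for i in range(len(s) - 1, -1, -1):
--         hash_value = (hash_value * multiplier + ord(s[i])) % prime
--     return hash_value
--
-- def HashDict(s, p_len, prime, multiplier):
--     D = {}
--     substring = s[len(s) - p_len:]
--     last = PolyHash(substring, prime, multiplier)
--     D[last] = len(s) - p_len
--     y = pow(multiplier, p_len, prime)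
--     for j in range(len(s) - p_len - 1, - 1, - 1):
--         current = (multiplier * last + ord(s[j]) - y * ord(s[j + p_len])) % prime
--         D[current] = j
--         last = current
--     return D
-- ===== SOURCE B (Python) =====
-- def PolyHash(s, prime, multiplier):
--     hash_value = 0
--     for i in range(len(s) - 1, -1, -1):
--         hash_value = (hash_value * multiplier + ord(s[i])) % prime
--     return hash_value
--
-- def HashDict(s, p_len, prime, multiplier):
--     start = len(s) - p_len
--     D = {PolyHash(s[start:], prime, multiplier): start}
--     for j in range(start - 1, -1, -1):
--         D[PolyHash(s[j:j + p_len], prime, multiplier)] = j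
--     return D
-- ===== Notes on version B (the rewrite author's own statement) =====
-- stated objective: simpler
-- what changed: B drops the rolling-hash recurrence and the pow(multiplier, p_len, prime) precomputation entirely and instead recomputes each window's hash from scratch with PolyHash on the slice s[j:j+p_len], seeding the dict with the last window s[len(s)-p_len:] and walking j down to 0.
import Mathlib
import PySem

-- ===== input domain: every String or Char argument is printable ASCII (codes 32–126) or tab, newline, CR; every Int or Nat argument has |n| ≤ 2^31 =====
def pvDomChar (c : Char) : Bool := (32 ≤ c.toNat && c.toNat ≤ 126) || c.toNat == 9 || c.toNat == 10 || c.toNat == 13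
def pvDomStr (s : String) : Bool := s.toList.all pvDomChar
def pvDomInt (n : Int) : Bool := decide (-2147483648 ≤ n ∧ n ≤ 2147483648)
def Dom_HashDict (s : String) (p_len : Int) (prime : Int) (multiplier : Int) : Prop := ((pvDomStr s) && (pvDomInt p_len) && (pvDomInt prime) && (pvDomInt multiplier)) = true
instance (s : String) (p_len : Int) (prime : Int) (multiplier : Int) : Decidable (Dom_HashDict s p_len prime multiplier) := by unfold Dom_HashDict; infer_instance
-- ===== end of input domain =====

-- B replaces A's incremental rolling-hash update with a direct recomputation of each
-- window's hash via PolyHash (objective: a genuinely different, simpler strategy of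
-- similar size; O(n·p_len) instead of O(n + p_len), not faster).

-- ===== PORT A =====
-- ord(c)
def pvOrd (c : Char) : Int := (c.toNat : Int)

-- the module helper PolyHash, shared by A and B (B's Source B re-declares the same helper):
-- hash_value = 0; for i in range(len(s)-1, -1, -1): hash_value = (hash_value*multiplier + ord(s[i])) % prime
def pvPolyHash (l : List Char) (prime : Int) (multiplier : Int) : Int :=
  (PySem.List.pyRange ((l.length : Int) - 1) (-1) (-1)).foldl
    (fun h i => PySem.Int.mod (h * multiplier + pvOrd (PySem.List.pyGetD l i ' ')) prime) 0

def HashDict (s : String) (p_len : Int) (prime : Int) (multiplier : Int) : List (Int × Int) :=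
  let cs := s.toList
  let n : Int := (cs.length : Int)
  let substring := PySem.List.slice cs (some (n - p_len)) none
  let last := pvPolyHash substring prime multiplier
  let D : PySem.Dict Int Int := PySem.Dict.empty.insert last (n - p_len)
  let y := PySem.Int.powMod multiplier p_len.toNat prime
  let r := (PySem.List.pyRange (n - p_len - 1) (-1) (-1)).foldl
    (fun st j =>
      (st.1.insert (PySem.Int.mod (multiplier * st.2 + pvOrd (PySem.List.pyGetD cs j ' ')
          - y * pvOrd (PySem.List.pyGetD cs (j + p_len) ' ')) prime) j,
       PySem.Int.mod (multiplier * st.2 + pvOrd (PySem.List.pyGetD cs j ' ')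
          - y * pvOrd (PySem.List.pyGetD cs (j + p_len) ' ')) prime))
    (D, last)
  r.1.items

-- ===== PORT B =====
def HashDict_alt (s : String) (p_len : Int) (prime : Int) (multiplier : Int) : List (Int × Int) :=
  let cs := s.toList
  let start : Int := (cs.length : Int) - p_len
  let D : PySem.Dict Int Int :=
    PySem.Dict.empty.insert (pvPolyHash (PySem.List.slice cs (some start) none) prime multiplier) start
  ((PySem.List.pyRange (start - 1) (-1) (-1)).foldl
    (fun D j =>
      D.insert (pvPolyHash (PySem.List.slice cs (some j) (some (j + p_len))) prime multiplier) j)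
    D).items

-- ===== PRECONDITION & SPEC =====
-- A raises on every input with prime = 0 (ZeroDivisionError in PolyHash, or ValueError from
-- pow(multiplier, p_len, 0)) and on every input with p_len < 0 (IndexError at s[j] with j ≥ len(s),
-- or ValueError from pow with a negative exponent); Pre_ excludes exactly those.
def Pre_HashDict (s : String) (p_len : Int) (prime : Int) (multiplier : Int) : Prop :=
  0 ≤ p_len ∧ prime ≠ 0
instance (s : String) (p_len : Int) (prime : Int) (multiplier : Int) : Decidable (Pre_HashDict s p_len prime multiplier) := by unfold Pre_HashDict; infer_instance
def pvWitness_HashDict : String × Int × Int × Int := ("ab", 1, 7, 3)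

def Spec_HashDict (s : String) (p_len : Int) (prime : Int) (multiplier : Int) (out : List (Int × Int)) : Prop := out = HashDict_alt s p_len prime multiplier
instance (s : String) (p_len : Int) (prime : Int) (multiplier : Int) (out : List (Int × Int)) : Decidable (Spec_HashDict s p_len prime multiplier out) := by unfold Spec_HashDict; infer_instance

-- ===== CLAIM (what is proved, stated in full; the proofs are below) =====
def Claim_equal_HashDict : Prop := ∀ (s : String) (p_len : Int) (prime : Int) (multiplier : Int), Dom_HashDict s p_len prime multiplier → Pre_HashDict s p_len prime multiplier → Spec_HashDict s p_len prime multiplier (HashDict s p_len prime multiplier)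

-- ===== LEMMAS AND PROOFS =====

-- congruence for Python's % (Int.fmod)
theorem pvFmodCong (a b n : Int) (h : n ∣ a - b) : a.fmod n = b.fmod n := by
  obtain ⟨k, hk⟩ := h
  have ha : a = b + n * k := by linarith
  subst ha
  exact Int.add_mul_fmod_self_left b n k

-- PolyHash's descending index loop is a right fold over the characters
theorem pvPolyHash_eq_foldr (l : List Char) (p m : Int) :
    pvPolyHash l p m = l.foldr (fun c h => PySem.Int.mod (h * m + pvOrd c) p) 0 := by
  unfold pvPolyHash
  have h1 : PySem.List.pyRange ((l.length : Int) - 1) (-1) (-1)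
      = (PySem.List.pyRange 0 (l.length : Int)).reverse := by
    have := PySem.List.pyRange_neg_one_eq_reverse ((l.length : Int) - 1) (-1)
    simpa using this
  rw [h1, List.foldl_reverse]
  conv_rhs => rw [← PySem.List.map_pyGetD_pyRange_zero' l ' ']
  rw [List.foldr_map]

-- the exact (un-reduced) polynomial value of a window
def pvS (l : List Char) (m : Int) : Int := l.foldr (fun c acc => pvOrd c + m * acc) 0

theorem pvPolyHash_eq_fmod_pvS (l : List Char) (p m : Int) :
    pvPolyHash l p m = (pvS l m).fmod p := by
  rw [pvPolyHash_eq_foldr]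
  induction l with
  | nil => simp [pvS]
  | cons c t ih =>
    rw [List.foldr_cons, ih]
    simp only [PySem.Int.mod]
    apply pvFmodCong
    have hfd : (pvS t m).fmod p = pvS t m - p * ((pvS t m).fdiv p) := by
      have := Int.fmod_add_mul_fdiv (pvS t m) p
      linarith
    have hcons : pvS (c :: t) m = pvOrd c + m * pvS t m := by simp [pvS]
    rw [hfd, hcons]
    exact ⟨-(((pvS t m).fdiv p) * m), by ring⟩

theorem pvS_append_singleton (u : List Char) (c : Char) (m : Int) :
    pvS (u ++ [c]) m = pvS u m + m ^ u.length * pvOrd c := by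
  induction u with
  | nil => simp [pvS]
  | cons d t ih =>
    simp only [List.cons_append, pvS, List.foldr_cons] at ih ⊢
    rw [ih, List.length_cons, pow_succ]
    ring

-- one rolling step over concrete windows, Nat indices
theorem pvStepCore (cs : List Char) (prime m : Int) (J P : Nat) (hlen : J + P < cs.length) :
    (m * (pvS ((cs.drop (J + 1)).take P) m).fmod prime + pvOrd (cs[J]'(by omega))
        - (m ^ P).fmod prime * pvOrd (cs[J + P]'hlen)).fmod prime
      = (pvS ((cs.drop J).take P) m).fmod prime := by
  cases P with
  | zero =>
    simp only [Nat.add_zero, List.take_zero, pvS, List.foldr_nil, pow_zero, Int.zero_fmod,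
      mul_zero, zero_add]
    have hfd : (1 : Int).fmod prime = 1 - prime * ((1 : Int).fdiv prime) := by
      have := Int.fmod_add_mul_fdiv (1 : Int) prime
      linarith
    have h2 : pvOrd (cs[J]'(by omega)) - (1 : Int).fmod prime * pvOrd (cs[J]'(by omega))
        = prime * (((1 : Int).fdiv prime) * pvOrd (cs[J]'(by omega))) := by rw [hfd]; ring
    rw [h2]
    exact Int.fmod_eq_zero_of_dvd ⟨_, rfl⟩
  | succ Q =>
    have hQlen : Q < (cs.drop (J + 1)).length := by
      rw [List.length_drop]; omega
    have hdecomp1 : (cs.drop J).take (Q + 1) = cs[J]'(by omega) :: (cs.drop (J + 1)).take Q := by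
      rw [List.drop_eq_getElem_cons (by omega : J < cs.length), List.take_succ_cons]
    have hdecomp2 : (cs.drop (J + 1)).take (Q + 1)
        = (cs.drop (J + 1)).take Q ++ [cs[J + (Q + 1)]'hlen] := by
      rw [List.take_succ]
      congr 1
      rw [List.getElem?_eq_getElem hQlen]
      simp only [Option.toList_some, List.getElem_drop]
      congr 2
      omega
    rw [hdecomp1, hdecomp2, pvS_append_singleton]
    have hulen : ((cs.drop (J + 1)).take Q).length = Q := by
      rw [List.length_take]; omega
    rw [hulen]
    set u := (cs.drop (J + 1)).take Q
    set cl := cs[J + (Q + 1)]'hlen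
    set c0 := cs[J]'(by omega : J < cs.length)
    have hScons : pvS (c0 :: u) m = pvOrd c0 + m * pvS u m := by simp [pvS]
    rw [hScons]
    apply pvFmodCong
    have hfd1 : (pvS u m + m ^ Q * pvOrd cl).fmod prime
        = pvS u m + m ^ Q * pvOrd cl - prime * ((pvS u m + m ^ Q * pvOrd cl).fdiv prime) := by
      have := Int.fmod_add_mul_fdiv (pvS u m + m ^ Q * pvOrd cl) prime
      linarith
    have hfd2 : (m ^ (Q + 1)).fmod prime
        = m ^ (Q + 1) - prime * ((m ^ (Q + 1)).fdiv prime) := by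
      have := Int.fmod_add_mul_fdiv (m ^ (Q + 1)) prime
      linarith
    rw [hfd1, hfd2]
    refine ⟨-((pvS u m + m ^ Q * pvOrd cl).fdiv prime) * m
        + ((m ^ (Q + 1)).fdiv prime) * pvOrd cl, by ring⟩

-- one rolling step produces exactly the next window's PolyHash (Int form used by the loop)
theorem pvStep (cs : List Char) (p prime m : Int) (hp : 0 ≤ p) (j : Int)
    (hj : 0 ≤ j) (hjp : j + p < (cs.length : Int)) :
    PySem.Int.mod (m * pvPolyHash (PySem.List.slice cs (some (j + 1)) (some (j + 1 + p))) prime m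
        + pvOrd (PySem.List.pyGetD cs j ' ')
        - PySem.Int.powMod m p.toNat prime * pvOrd (PySem.List.pyGetD cs (j + p) ' ')) prime
      = pvPolyHash (PySem.List.slice cs (some j) (some (j + p))) prime m := by
  obtain ⟨J, rfl⟩ : ∃ J : Nat, j = (J : Int) := ⟨j.toNat, by omega⟩
  obtain ⟨P, rfl⟩ : ∃ P : Nat, p = (P : Int) := ⟨p.toNat, by omega⟩
  have hlen : J + P < cs.length := by omega
  have hget1 : PySem.List.pyGetD cs (J : Int) ' ' = cs[J]'(by omega) := by
    rw [PySem.List.pyGetD_eq_getElem cs ' ' hj (by omega)]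
    simp
  have hget2 : PySem.List.pyGetD cs ((J : Int) + (P : Int)) ' ' = cs[J + P]'hlen := by
    rw [PySem.List.pyGetD_eq_getElem cs ' ' (by omega) (by omega)]
    congr 1 <;> omega
  have hsl1 : PySem.List.slice cs (some (J : Int)) (some ((J : Int) + (P : Int)))
      = (cs.drop J).take P := by
    have h := PySem.List.slice_natCast cs J (J + P)
    have e1 : ((J + P : Nat) : Int) = (J : Int) + (P : Int) := by push_cast; ring
    rw [e1] at h
    have e3 : J + P - J = P := by omega
    rw [h, e3]
  have hsl2 : PySem.List.slice cs (some ((J : Int) + 1)) (some ((J : Int) + 1 + (P : Int)))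
      = (cs.drop (J + 1)).take P := by
    have h := PySem.List.slice_natCast cs (J + 1) (J + 1 + P)
    have e1 : ((J + 1 : Nat) : Int) = (J : Int) + 1 := by push_cast; ring
    have e2 : ((J + 1 + P : Nat) : Int) = (J : Int) + 1 + (P : Int) := by push_cast; ring
    rw [e1, e2] at h
    have e3 : J + 1 + P - (J + 1) = P := by omega
    rw [h, e3]
  rw [hsl1, hsl2, hget1, hget2, pvPolyHash_eq_fmod_pvS, pvPolyHash_eq_fmod_pvS]
  simp only [PySem.Int.mod, PySem.Int.powMod, Int.toNat_natCast]
  exact pvStepCore cs prime m J P hlen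

-- the whole loop: A's (dict, last) fold equals B's dict fold, given the rolling invariant
theorem pvLoop (cs : List Char) (p prime m : Int) (hp : 0 ≤ p) :
    ∀ (t : Nat) (k : Int), (k + 1).toNat = t → k + p < (cs.length : Int) →
    ∀ (D : PySem.Dict Int Int) (last : Int),
      last = pvPolyHash (PySem.List.slice cs (some (k + 1)) (some (k + 1 + p))) prime m →
      ((PySem.List.pyRange k (-1) (-1)).foldl
        (fun st j =>
          (st.1.insert (PySem.Int.mod (m * st.2 + pvOrd (PySem.List.pyGetD cs j ' ')
              - PySem.Int.powMod m p.toNat prime * pvOrd (PySem.List.pyGetD cs (j + p) ' ')) prime) j,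
           PySem.Int.mod (m * st.2 + pvOrd (PySem.List.pyGetD cs j ' ')
              - PySem.Int.powMod m p.toNat prime * pvOrd (PySem.List.pyGetD cs (j + p) ' ')) prime))
        (D, last)).1
      = (PySem.List.pyRange k (-1) (-1)).foldl
          (fun D j =>
            D.insert (pvPolyHash (PySem.List.slice cs (some j) (some (j + p))) prime m) j) D := by
  intro t
  induction t with
  | zero =>
    intro k hk _ D last _
    rw [PySem.List.pyRange_neg_one_eq_nil (by omega : k ≤ -1)]
    simp
  | succ t ih =>
    intro k hk hkp D last hlast
    have hk0 : 0 ≤ k := by omega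
    rw [PySem.List.pyRange_neg_one_cons (by omega : (-1 : Int) < k)]
    simp only [List.foldl_cons]
    have hcur : PySem.Int.mod (m * last + pvOrd (PySem.List.pyGetD cs k ' ')
        - PySem.Int.powMod m p.toNat prime * pvOrd (PySem.List.pyGetD cs (k + p) ' ')) prime
        = pvPolyHash (PySem.List.slice cs (some k) (some (k + p))) prime m := by
      rw [hlast]
      exact pvStep cs p prime m hp k hk0 hkp
    rw [hcur]
    exact ih (k - 1) (by omega) (by omega) _ _ (by rw [show k - 1 + 1 = k from by ring])

-- the seed slice s[len-p:] is the window [len-p, len) when the loop is nonempty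
theorem pvSeedSlice (cs : List Char) (p : Int) (hp : 0 ≤ p)
    (h : 0 ≤ (cs.length : Int) - p - 1) :
    PySem.List.slice cs (some ((cs.length : Int) - p)) none
      = PySem.List.slice cs (some ((cs.length : Int) - p)) (some ((cs.length : Int) - p + p)) := by
  set a : Int := (cs.length : Int) - p with ha
  have ha0 : 0 ≤ a := by omega
  have hA : a = (a.toNat : Int) := by omega
  have heq : a + p = ((cs.length : Nat) : Int) := by omega
  have hr : PySem.List.slice cs (some a) (some (a + p)) = cs.drop a.toNat := by
    conv_lhs => rw [heq, hA]
    rw [PySem.List.slice_natCast cs a.toNat cs.length]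
    exact List.take_of_length_le (by rw [List.length_drop])
  rw [PySem.List.slice_from cs ha0, hr]

-- ===== VERDICT (by name: the statement is the Claim_ definition above) =====
theorem HashDict_spec : Claim_equal_HashDict := by
  intro s p_len prime multiplier _ hpre
  obtain ⟨hp, hprime⟩ := hpre
  unfold Spec_HashDict
  simp only [HashDict, HashDict_alt]
  set cs := s.toList with hcs
  set n : Int := (cs.length : Int) with hn
  by_cases hloop : n - p_len - 1 < 0
  · rw [PySem.List.pyRange_neg_one_eq_nil (by omega : n - p_len - 1 ≤ -1)]
    simp
  · have hseed := pvSeedSlice cs p_len hp (by omega)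
    have := pvLoop cs p_len prime multiplier hp (n - p_len).toNat (n - p_len - 1)
      (by omega) (by omega)
      (PySem.Dict.empty.insert
        (pvPolyHash (PySem.List.slice cs (some (n - p_len)) none) prime multiplier) (n - p_len))
      (pvPolyHash (PySem.List.slice cs (some (n - p_len)) none) prime multiplier)
      (by rw [show n - p_len - 1 + 1 = n - p_len from by ring, hseed])
    rw [this]
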